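-- pv_equiv track=rewrite | github.com/Lee-RoyDobson/DigitMusic | ExtractNotes.py | generate_note_scale
-- ===== SOURCE A (Python) =====
-- def generate_note_scale(key, note_scale, note_pattern):
--     """ Generates a note scale based on the key and note pattern and returns a dictionary of the note and direction """
--     # The key works out to be the starting index of the note scale
--     start_index = note_scale.index(key)
--     # Start at direciton 1 (North)
--     direction_count = 1
--     # Create the scale dictionary with the starting note
--     scale = {note_scale[start_index] : direction_count}
--     current_index = start_index
--
--     # Iterate over each step in the note pattern
--     for step in note_pattern:
--         # Increment the direction count for the next direction
--         direction_count += 1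
--         # Get the next index accounting for the length of the note scale
--         current_index = (current_index + step) % len(note_scale)
--         # If the note at the current index is not already in the scale, add it
--         if note_scale[current_index] not in scale:
--             scale[note_scale[current_index]] = direction_count
--
--
--     return scale
-- ===== SOURCE B (Python) =====
-- def generate_note_scale(key, note_scale, note_pattern):
--     """Recursive back-to-front construction: build the deduplicated (note, position)
--     walk as a list by recursion, removing the head note from the recursively built
--     suffix, then convert the pair list to a dict at the end."""
--     n = len(note_scale)
--
--     def walk(idx, pos, steps):
--         note = note_scale[idx]
--         if not steps:
--             return [(note, pos)]
--         rest = walk((idx + steps[0]) % n, pos + 1, steps[1:])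
--         return [(note, pos)] + [e for e in rest if e[0] != note]
--
--     return dict(walk(note_scale.index(key), 1, note_pattern))
-- ===== Notes on version B (the rewrite author's own statement) =====
-- stated objective: alternative
-- what changed: Replaces A's stateful loop (mutable index, direction counter and membership-checked dict updated per step) by a recursive back-to-front construction: the walk is built as a plain (note, position) list by recursion, duplicates are removed by filtering the head note out of the recursively built suffix, and the pair list is turned into a dict only at the end.
import Mathlib
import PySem

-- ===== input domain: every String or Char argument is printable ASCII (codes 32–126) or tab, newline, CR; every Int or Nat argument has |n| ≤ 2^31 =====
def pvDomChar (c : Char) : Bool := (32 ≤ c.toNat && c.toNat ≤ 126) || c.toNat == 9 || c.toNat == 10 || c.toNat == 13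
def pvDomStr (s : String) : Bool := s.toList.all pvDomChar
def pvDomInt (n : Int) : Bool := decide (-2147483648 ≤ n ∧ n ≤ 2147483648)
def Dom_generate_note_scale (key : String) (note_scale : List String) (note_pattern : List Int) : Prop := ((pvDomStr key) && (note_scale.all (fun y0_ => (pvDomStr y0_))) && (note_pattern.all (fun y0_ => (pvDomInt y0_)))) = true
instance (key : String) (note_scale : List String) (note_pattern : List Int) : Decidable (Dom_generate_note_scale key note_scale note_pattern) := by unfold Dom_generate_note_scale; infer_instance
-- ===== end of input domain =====

-- B replaces A's stateful dict-building loop by a recursive back-to-front construction of the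
-- deduplicated (note, position) list, converted to a dict at the end; same cost, different algorithm shape.

-- ===== PORT A =====
-- state of A's loop: (direction_count, current_index, scale); indexing is always in range, so pyGetD "" is exact
def generate_note_scale (key : String) (note_scale : List String) (note_pattern : List Int) : List (String × Int) :=
  match PySem.List.index? note_scale key with
  | none => []   -- note_scale.index(key) raises ValueError; excluded by Pre_
  | some s0 =>
    let start_index : Int := (s0 : Int)
    let scale0 : PySem.Dict String Int :=
      PySem.Dict.insert PySem.Dict.empty (PySem.List.pyGetD note_scale start_index "") 1
    let fin := note_pattern.foldl
      (fun (st : Int × Int × PySem.Dict String Int) step =>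
        let dc := st.1 + 1
        let ci := PySem.Int.mod (st.2.1 + step) (PySem.List.len note_scale)
        let note := PySem.List.pyGetD note_scale ci ""
        (dc, ci, if st.2.2.contains note then st.2.2 else st.2.2.insert note dc))
      (1, start_index, scale0)
    fin.2.2.items

-- ===== PORT B =====
-- the recursive helper 'walk' of Source B: emit the current note, recurse, filter it out of the suffix
def pvWalk (note_scale : List String) (n : Int) (idx pos : Int) : List Int → List (String × Int)
  | [] => [(PySem.List.pyGetD note_scale idx "", pos)]
  | s :: rest =>
    let note := PySem.List.pyGetD note_scale idx ""
    (note, pos) ::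
      (pvWalk note_scale n (PySem.Int.mod (idx + s) n) (pos + 1) rest).filter (fun e => e.1 != note)

def generate_note_scale_alt (key : String) (note_scale : List String) (note_pattern : List Int) : List (String × Int) :=
  match PySem.List.index? note_scale key with
  | none => []   -- note_scale.index(key) raises ValueError; excluded by Pre_
  | some s0 =>
    let n : Int := PySem.List.len note_scale
    let pairs := pvWalk note_scale n (s0 : Int) 1 note_pattern
    (pairs.foldl (fun (d : PySem.Dict String Int) kv => d.insert kv.1 kv.2) PySem.Dict.empty).items

-- ===== PRECONDITION & SPEC =====
-- Pre_ excludes exactly the inputs where note_scale.index(key) raises ValueError (key not in note_scale), on which both A and B raise.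
def Pre_generate_note_scale (key : String) (note_scale : List String) (note_pattern : List Int) : Prop :=
  key ∈ note_scale
instance (key : String) (note_scale : List String) (note_pattern : List Int) : Decidable (Pre_generate_note_scale key note_scale note_pattern) := by unfold Pre_generate_note_scale; infer_instance

def pvWitness_generate_note_scale : String × List String × List Int := ("C", ["C", "D", "E"], [1, 2])

def Spec_generate_note_scale (key : String) (note_scale : List String) (note_pattern : List Int) (out : List (String × Int)) : Prop := out = generate_note_scale_alt key note_scale note_pattern
instance (key : String) (note_scale : List String) (note_pattern : List Int) (out : List (String × Int)) : Decidable (Spec_generate_note_scale key note_scale note_pattern out) := by unfold Spec_generate_note_scale; infer_instance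

-- ===== CLAIM =====
def Claim_equal_generate_note_scale : Prop := ∀ (key : String) (note_scale : List String) (note_pattern : List Int), Dom_generate_note_scale key note_scale note_pattern → Pre_generate_note_scale key note_scale note_pattern → Spec_generate_note_scale key note_scale note_pattern (generate_note_scale key note_scale note_pattern)

-- ===== LEMMAS AND PROOFS =====

-- the walk from the position AFTER the current one (A's loop body sees only these)
def pvWalkTail (note_scale : List String) (n : Int) (idx pos : Int) : List Int → List (String × Int)
  | [] => []
  | s :: rest => pvWalk note_scale n (PySem.Int.mod (idx + s) n) (pos + 1) rest

-- pvWalk emits the current note then the filtered tail walk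
theorem pvWalk_eq_cons (note_scale : List String) (n idx pos : Int) (steps : List Int) :
    pvWalk note_scale n idx pos steps
      = (PySem.List.pyGetD note_scale idx "", pos) ::
        (pvWalkTail note_scale n idx pos steps).filter
          (fun e => e.1 != PySem.List.pyGetD note_scale idx "") := by
  cases steps <;> simp [pvWalk, pvWalkTail]

-- keys of the walk are distinct
theorem pvWalk_nodup_keys (note_scale : List String) (n : Int) :
    ∀ (steps : List Int) (idx pos : Int),
      ((pvWalk note_scale n idx pos steps).map (·.1)).Nodup := by
  intro steps
  induction steps with
  | nil => intro idx pos; simp [pvWalk]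
  | cons s rest ih =>
    intro idx pos
    simp only [pvWalk, List.map_cons, List.nodup_cons]
    constructor
    · intro hmem
      obtain ⟨e, he, heq⟩ := List.mem_map.mp hmem
      have := (List.mem_filter.mp he).2
      simp [heq] at this
    · exact List.Nodup.sublist (List.Sublist.map _ List.filter_sublist) (ih _ _)

-- filtering a key already filtered does nothing new; absorbing a contained key
theorem pvFilter_filter_of_contains (d : PySem.Dict String Int) (note : String)
    (hc : d.contains note = true) (l : List (String × Int)) :
    (l.filter (fun e => e.1 != note)).filter (fun e => !d.contains e.1)
      = l.filter (fun e => !d.contains e.1) := by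
  induction l with
  | nil => rfl
  | cons x xs ih =>
    by_cases hx : x.1 = note
    · simp [hx, hc, ih]
    · simp only [List.filter_cons, bne_iff_ne, ne_eq, hx, not_false_eq_true, if_true, ih]

-- filtering through an inserted key splits into the two filters
theorem pvFilter_insert (d : PySem.Dict String Int) (note : String) (v : Int)
    (l : List (String × Int)) :
    l.filter (fun e => !(d.insert note v).contains e.1)
      = (l.filter (fun e => e.1 != note)).filter (fun e => !d.contains e.1) := by
  rw [List.filter_filter]
  apply List.filter_congr
  intro e _
  simp only [PySem.Dict.contains_insert, Bool.not_or, bne, Bool.and_comm]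

-- main invariant: A's remaining loop, started at (pos, idx, d), yields d.items ++ the tail walk
-- with the notes already in d filtered out
theorem pvMain (note_scale : List String) :
    ∀ (steps : List Int) (idx pos : Int) (d : PySem.Dict String Int),
    (steps.foldl
      (fun (st : Int × Int × PySem.Dict String Int) step =>
        let dc := st.1 + 1
        let ci := PySem.Int.mod (st.2.1 + step) (PySem.List.len note_scale)
        let note := PySem.List.pyGetD note_scale ci ""
        (dc, ci, if st.2.2.contains note then st.2.2 else st.2.2.insert note dc))
      (pos, idx, d)).2.2.items
    = d.items ++ (pvWalkTail note_scale (PySem.List.len note_scale) idx pos steps).filter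
        (fun e => !d.contains e.1) := by
  intro steps
  induction steps with
  | nil => intro idx pos d; simp [pvWalkTail]
  | cons s rest ih =>
    intro idx pos d
    simp only [List.foldl_cons, pvWalkTail]
    rw [pvWalk_eq_cons]
    by_cases hc : d.contains
        (PySem.List.pyGetD note_scale (PySem.Int.mod (idx + s) (PySem.List.len note_scale)) "")
        = true
    · simp only [hc, if_true, ih, List.filter_cons, Bool.not_true, Bool.false_eq_true, if_false]
      rw [pvFilter_filter_of_contains d _ hc]
    · have hc' : d.contains
          (PySem.List.pyGetD note_scale (PySem.Int.mod (idx + s) (PySem.List.len note_scale)) "")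
          = false := by simpa using hc
      simp only [hc', Bool.false_eq_true, if_false, ih,
        PySem.Dict.items_insert_of_not_contains _ _ hc', List.filter_cons, Bool.not_false,
        if_true, List.append_assoc, List.cons_append, List.nil_append]
      rw [pvFilter_insert]

-- ===== VERDICT =====
theorem generate_note_scale_spec : Claim_equal_generate_note_scale := by
  intro key note_scale note_pattern _ hpre
  unfold Spec_generate_note_scale generate_note_scale generate_note_scale_alt
  obtain ⟨k, hk⟩ := Option.isSome_iff_exists.mp
    ((PySem.List.index?_isSome_iff note_scale key).mpr hpre)
  rw [hk]
  simp only
  rw [pvMain note_scale note_pattern (k : Int) 1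
      (PySem.Dict.insert PySem.Dict.empty (PySem.List.pyGetD note_scale (k : Int) "") 1)]
  rw [PySem.Dict.items_foldl_insert_fresh _ _ _ _
      (fun a _ => PySem.Dict.contains_empty _)
      (pvWalk_nodup_keys note_scale (PySem.List.len note_scale) note_pattern (k : Int) 1)]
  rw [pvWalk_eq_cons,
    PySem.Dict.items_insert_of_not_contains _ _ (PySem.Dict.contains_empty _),
    pvFilter_insert]
  simp [PySem.Dict.empty]
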